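-- pv_equiv track=rewrite | github.com/anthony-lamelas/Panelize_frontend | app/services/openai_service.py | parse_gpt_panels
-- ===== SOURCE A (Python) =====
-- def parse_gpt_panels(gpt_content: str, num_panels: int):
--     # Split GPT output lines into separatr prompts
--     lines = gpt_content.strip().split("\n")
--     panel_prompts = []
--     current_prompt = []
--
--     for line in lines:
--         if "Panel" in line and ":" in line:
--             # If we have an existing prompt, finalize it
--             if current_prompt:
--                 panel_prompts.append("\n".join(current_prompt).strip())
--                 current_prompt = []
--
--             # Start a new prompt
--             current_prompt.append(line.split(":", 1)[1].strip())
--         else: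
--             current_prompt.append(line.strip())
--
--     # Last prompt
--     if current_prompt:
--         panel_prompts.append("\n".join(current_prompt).strip())
--
--     return panel_prompts[:num_panels]
-- ===== SOURCE B (Python) =====
-- def parse_gpt_panels(gpt_content: str, num_panels: int):
--     # Staged segmentation: an outer loop takes one whole block per iteration,
--     # an inner scan finds the next delimiter line; no flush-accumulator state.
--     lines = gpt_content.strip().split("\n")
--     prompts = []
--     i, n = 0, len(lines)
--     while i < n:
--         line = lines[i]
--         if "Panel" in line and ":" in line:
--             head = line.split(":", 1)[1].strip()
--         else:
--             head = line.strip()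
--         j = i + 1
--         while j < n and not ("Panel" in lines[j] and ":" in lines[j]):
--             j += 1
--         prompts.append("\n".join([head] + [l.strip() for l in lines[i + 1:j]]).strip())
--         i = j
--     return prompts[:num_panels]
-- ===== Notes on version B (the rewrite author's own statement) =====
-- stated objective: alternative
-- what changed: B replaces A's single pass with a flush-on-delimiter accumulator by staged segmentation: an outer loop emits one prompt per block, using an inner scan to the next delimiter line to delimit the block, then joins its head (after-colon text or stripped first line) with the stripped body lines.
import Mathlib
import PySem

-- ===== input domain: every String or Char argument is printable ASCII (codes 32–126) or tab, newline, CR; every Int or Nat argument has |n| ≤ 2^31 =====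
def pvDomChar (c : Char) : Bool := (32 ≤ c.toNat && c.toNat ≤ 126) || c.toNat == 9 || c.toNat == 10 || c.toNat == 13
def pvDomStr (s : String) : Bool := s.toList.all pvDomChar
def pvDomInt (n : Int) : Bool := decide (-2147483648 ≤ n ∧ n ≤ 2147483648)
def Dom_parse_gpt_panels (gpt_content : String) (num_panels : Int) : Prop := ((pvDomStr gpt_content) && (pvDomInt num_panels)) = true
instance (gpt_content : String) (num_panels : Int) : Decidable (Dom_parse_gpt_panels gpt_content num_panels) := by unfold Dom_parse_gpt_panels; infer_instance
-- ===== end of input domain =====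

-- B replaces A's single pass with a flush-on-delimiter accumulator by staged
-- segmentation (outer loop emits one prompt per block, inner scan finds the next
-- delimiter); objective: alternative.

-- helpers shared by both ports (both Pythons contain the same two expressions)
def pvDelim (line : String) : Bool := PySem.Str.isIn "Panel" line && PySem.Str.isIn ":" line
def pvTail (line : String) : String :=
  PySem.Str.strip ((((PySem.Str.splitMax? line ":" 1).getD []).getD 1 ""))

-- ===== PORT A =====
def pvStepA (st : List String × List String) (line : String) : List String × List String :=
  if pvDelim line then
    (if st.2 ≠ [] then st.1 ++ [PySem.Str.strip (PySem.Str.join "\n" st.2)] else st.1,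
     [pvTail line])
  else (st.1, st.2 ++ [PySem.Str.strip line])

def pvFinA (st : List String × List String) : List String :=
  if st.2 ≠ [] then st.1 ++ [PySem.Str.strip (PySem.Str.join "\n" st.2)] else st.1

def parse_gpt_panels (gpt_content : String) (num_panels : Int) : List String :=
  let lines := (PySem.Str.split? (PySem.Str.strip gpt_content) "\n").getD []
  PySem.List.slice (pvFinA (lines.foldl pvStepA ([], []))) none (some num_panels)

-- ===== PORT B =====
-- Source B's outer while-loop: each iteration consumes one block (head line plus the
-- inner scan's body = the run of non-delimiter lines) and emits one prompt.
def pvBlocks : List String → List String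
  | [] => []
  | l :: ls =>
    let head := if pvDelim l then pvTail l else PySem.Str.strip l
    let body := ls.takeWhile (fun x => !pvDelim x)
    PySem.Str.strip (PySem.Str.join "\n" (head :: body.map PySem.Str.strip))
      :: pvBlocks (ls.dropWhile (fun x => !pvDelim x))
  termination_by ls => ls.length
  decreasing_by
    simpa using Nat.lt_succ_of_le (List.length_dropWhile_le _ _)

def parse_gpt_panels_alt (gpt_content : String) (num_panels : Int) : List String :=
  let lines := (PySem.Str.split? (PySem.Str.strip gpt_content) "\n").getD []
  PySem.List.slice (pvBlocks lines) none (some num_panels)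

-- ===== PRECONDITION & SPEC =====
def Spec_parse_gpt_panels (gpt_content : String) (num_panels : Int) (out : List String) : Prop := out = parse_gpt_panels_alt gpt_content num_panels
instance (gpt_content : String) (num_panels : Int) (out : List String) : Decidable (Spec_parse_gpt_panels gpt_content num_panels out) := by unfold Spec_parse_gpt_panels; infer_instance

-- ===== CLAIM (what is proved, stated in full; the proofs are below) =====
def Claim_equal_parse_gpt_panels : Prop := ∀ (gpt_content : String) (num_panels : Int), Dom_parse_gpt_panels gpt_content num_panels → Spec_parse_gpt_panels gpt_content num_panels (parse_gpt_panels gpt_content num_panels)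

-- ===== LEMMAS AND PROOFS =====

-- characterization of A's fold: prompts of a line list given an open block `cp`
-- (gFull) / no open block yet (gE)
def gFull (cp : List String) : List String → List String
  | [] => [PySem.Str.strip (PySem.Str.join "\n" cp)]
  | l :: ls =>
    if pvDelim l then PySem.Str.strip (PySem.Str.join "\n" cp) :: gFull [pvTail l] ls
    else gFull (cp ++ [PySem.Str.strip l]) ls

def gE : List String → List String
  | [] => []
  | l :: ls => if pvDelim l then gFull [pvTail l] ls else gFull [PySem.Str.strip l] ls

theorem foldA_char (ls : List String) : ∀ (pp cp : List String),
    pvFinA (ls.foldl pvStepA (pp, cp)) = pp ++ (if cp = [] then gE ls else gFull cp ls) := by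
  induction ls with
  | nil =>
    intro pp cp
    by_cases h : cp = [] <;> simp [pvFinA, gE, gFull, h]
  | cons l ls ih =>
    intro pp cp
    simp only [List.foldl_cons, pvStepA]
    by_cases hd : pvDelim l
    · by_cases h : cp = []
      · simp [hd, h, ih, gE]
      · simp [hd, h, ih, gFull, List.append_assoc]
    · by_cases h : cp = []
      · simp [hd, h, ih, gE]
      · have hne : cp ++ [PySem.Str.strip l] ≠ [] := by simp
        simp [hd, h, ih, gFull, hne]

theorem gFull_blocks (ls : List String) : ∀ (cp : List String),
    gFull cp ls =
      PySem.Str.strip (PySem.Str.join "\n"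
          (cp ++ (ls.takeWhile (fun x => !pvDelim x)).map PySem.Str.strip))
        :: pvBlocks (ls.dropWhile (fun x => !pvDelim x)) := by
  induction ls with
  | nil => intro cp; simp [gFull, pvBlocks]
  | cons l ls ih =>
    intro cp
    by_cases hd : pvDelim l
    · simp only [gFull, hd, if_pos, List.takeWhile_cons, List.dropWhile_cons,
        Bool.not_true, Bool.false_eq_true, if_false, List.map_nil, List.append_nil]
      rw [pvBlocks]
      simp only [hd, if_pos]
      have h1 := ih [pvTail l]
      rw [List.singleton_append] at h1
      exact congrArg _ h1
    · simp only [gFull, hd, Bool.false_eq_true, if_false, List.takeWhile_cons,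
        List.dropWhile_cons, Bool.not_false, if_pos, List.map_cons]
      rw [ih (cp ++ [PySem.Str.strip l]), List.append_assoc, List.singleton_append]

theorem gE_blocks (ls : List String) : gE ls = pvBlocks ls := by
  cases ls with
  | nil => simp [gE, pvBlocks]
  | cons l ls =>
    rw [pvBlocks]
    by_cases hd : pvDelim l
    · simp only [gE, hd, if_pos]
      have h1 := gFull_blocks ls [pvTail l]
      rw [List.singleton_append] at h1
      exact h1
    · simp only [gE, hd, Bool.false_eq_true, if_false]
      have h1 := gFull_blocks ls [PySem.Str.strip l]
      rw [List.singleton_append] at h1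
      exact h1

-- ===== VERDICT (by name: the statement is the Claim_ definition above) =====
theorem parse_gpt_panels_spec : Claim_equal_parse_gpt_panels := by
  intro g n _
  unfold Spec_parse_gpt_panels parse_gpt_panels parse_gpt_panels_alt
  simp only [foldA_char, gE_blocks]
  simp
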